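-- pv_equiv track=rewrite | github.com/anup-66/codes | codeforces_june3.py | find1
-- ===== SOURCE A (Python) =====
-- def find1(str_, set_):
--     queue = []
--     count = 0
--     queue.append(str_)
--     dp = {}
--     while queue:
--         str_ = queue.pop(0)
--         if not str_:
--             continue
--         one = str_[1:]
--         second = str_[0] + str_[2:]
--         if one not in set_:
--             queue.append(one)
--             count+=1
--             set_.add(one)
--
--         if second not in set_:
--             queue.append(second)
--             count+=1
--             set_.add(second)
--     return count
-- ===== SOURCE B (Python) =====
-- def find1(str_, set_):
--     # Every string reachable by repeatedly deleting the first or the second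
--     # character is "one kept character followed by a suffix": str_[i:i+1] + str_[j:].
--     # A node's children are the bare suffix str_[j:] (drop the kept character)
--     # and str_[i:i+1] + str_[j+1:] (drop the first suffix character), so the nodes
--     # can be walked level by level on the suffix start j, keeping only the
--     # positions i whose string is new; by j = n + 2 every node repeats.
--     n = len(str_)
--     count = 0
--     alive = [1, 0] if str_ else []
--     for j in range(2, n + 3):
--         suf = str_[j:]
--         nxt = []
--         for i in alive:
--             t = str_[i:i+1] + suf
--             if t not in set_:
--                 set_.add(t)
--                 count += 1
--                 if t:  # the empty string has no characters left to delete
--                     nxt.append(i)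
--         alive = [j] + nxt if nxt else []
--     return count
-- ===== Notes on version B (the rewrite author's own statement) =====
-- stated objective: alternative
-- what changed: Replaces A's FIFO queue of materialized strings with a level walk over suffix starts j: every reachable string is str_[i:i+1] + str_[j:], so B carries only the alive kept-character positions i from level to level instead of a growing queue of strings popped with pop(0).
import Mathlib
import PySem

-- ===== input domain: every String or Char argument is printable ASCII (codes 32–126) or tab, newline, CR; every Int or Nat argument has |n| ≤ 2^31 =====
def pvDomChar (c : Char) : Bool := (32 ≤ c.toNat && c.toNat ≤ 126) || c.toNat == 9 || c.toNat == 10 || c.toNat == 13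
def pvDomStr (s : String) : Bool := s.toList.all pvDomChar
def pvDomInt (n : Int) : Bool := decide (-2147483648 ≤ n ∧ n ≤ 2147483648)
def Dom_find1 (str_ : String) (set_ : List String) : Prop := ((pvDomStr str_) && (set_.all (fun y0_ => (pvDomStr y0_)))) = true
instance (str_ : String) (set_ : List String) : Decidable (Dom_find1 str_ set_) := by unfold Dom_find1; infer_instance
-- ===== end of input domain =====

-- B replaces A's FIFO queue of materialized strings by a level walk over suffix starts,
-- carrying only the alive kept-character positions instead of a queue of strings.
-- Both A and B mutate set_ in Python (adding the same counted strings); the equivalence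
-- proved here is about the RETURN value.

-- ===== PORT A =====
-- Python "c + t" where c is one character (str_[0] is a 1-char str); exact on toList
def pvCons (c : Char) (t : String) : String := String.ofList (c :: t.toList)

-- while queue: …  (A's loop; fuel only makes it total: one unit per popped element, and
-- the proofs below show the generous fuel in find1 is never exhausted)
def find1Loop (fuel : Nat) (queue : List String) (set_ : PySem.Set String) (count : Int) : Int :=
  match fuel, queue with
  | 0, _ => count
  | _ + 1, [] => count
  | fuel + 1, t :: rest =>
    if t = "" then find1Loop fuel rest set_ count
    else
      let one := PySem.Str.slice t (some 1) none          -- str_[1:]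
      let second :=                                        -- str_[0] + str_[2:]
        match PySem.Str.pyGet? t 0 with
        | some c => pvCons c (PySem.Str.slice t (some 2) none)
        | none => ""                                       -- unreachable: t ≠ "" here
      let (queue1, set1, count1) :=
        if PySem.Set.contains set_ one then (rest, set_, count)
        else (rest ++ [one], PySem.Set.add set_ one, count + 1)
      let (queue2, set2, count2) :=
        if PySem.Set.contains set1 second then (queue1, set1, count1)
        else (queue1 ++ [second], PySem.Set.add set1 second, count1 + 1)
      find1Loop fuel queue2 set2 count2

def find1 (str_ : String) (set_ : List String) : Int :=
  find1Loop (2 * ((PySem.Str.len str_).toNat + 2) * ((PySem.Str.len str_).toNat + 2) + 4)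
    [str_] set_ 0

-- ===== PORT B =====
-- Python "s + t" on strings; exact on toList
def pvCat (s t : String) : String := String.ofList (s.toList ++ t.toList)

-- body of Source B's inner "for i in alive" loop; state (set_, count, nxt)
def find1AltInner (str_ : String) (suf : String)
    (st : PySem.Set String × Int × List Int) (i : Int) :
    PySem.Set String × Int × List Int :=
  let t := pvCat (PySem.Str.slice str_ (some i) (some (i + 1))) suf   -- str_[i:i+1] + suf
  if PySem.Set.contains st.1 t then st
  else (PySem.Set.add st.1 t, st.2.1 + 1, if t = "" then st.2.2 else st.2.2 ++ [i])

-- body of Source B's "for j in range(2, n + 3)" loop; state (set_, count, alive)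
def find1AltStep (str_ : String)
    (st : PySem.Set String × Int × List Int) (j : Int) :
    PySem.Set String × Int × List Int :=
  let suf := PySem.Str.slice str_ (some j) none                       -- str_[j:]
  let p := st.2.2.foldl (find1AltInner str_ suf) (st.1, st.2.1, ([] : List Int))
  (p.1, p.2.1, if p.2.2 = [] then [] else j :: p.2.2)                 -- [j] + nxt if nxt else []

def find1_alt (str_ : String) (set_ : List String) : Int :=
  let alive : List Int := if str_ = "" then [] else [1, 0]
  let st := (PySem.List.pyRange 2 (PySem.Str.len str_ + 3) 1).foldl (find1AltStep str_)
    ((set_ : PySem.Set String), 0, alive)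
  st.2.1

-- ===== PRECONDITION & SPEC =====
def Spec_find1 (str_ : String) (set_ : List String) (out : Int) : Prop := out = find1_alt str_ set_
instance (str_ : String) (set_ : List String) (out : Int) : Decidable (Spec_find1 str_ set_ out) := by unfold Spec_find1; infer_instance

-- ===== CLAIM (what is proved, stated in full; the proofs are below) =====
def Claim_equal_find1 : Prop := ∀ (str_ : String) (set_ : List String), Dom_find1 str_ set_ → Spec_find1 str_ set_ (find1 str_ set_)

-- ===== LEMMAS AND PROOFS =====

-- The common model: every reachable string is "kept char + suffix", nstr cs j i = cs[i:i+1] + cs[j:].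
def nstr (cs : List Char) (j i : Nat) : String :=
  String.ofList ((cs.drop i).take 1 ++ cs.drop j)

-- one level of B: membership-test the node of each index, count fresh ones, keep fresh non-empty ones
def bIter (cs : List Char) (j : Nat) :
    List Nat → PySem.Set String × Int × List Nat → PySem.Set String × Int × List Nat
  | [], st => st
  | i :: L, st =>
      bIter cs j L (if PySem.Set.contains st.1 (nstr cs j i) then st
        else (PySem.Set.add st.1 (nstr cs j i), st.2.1 + 1,
              if nstr cs j i = "" then st.2.2 else st.2.2 ++ [i]))

-- B's run from level l with rem remaining levels, K = alive positions minus the level head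
def modelRun (cs : List Char) : Nat → Nat → List Nat → PySem.Set String → Int → Int
  | 0, _, _, _, c => c
  | rem + 1, l, K, S, c =>
      let r := bIter cs (l + 1) (if K = [] then [] else l :: K) (S, c, [])
      modelRun cs rem (l + 1) r.2.2 r.1 r.2.1

-- fuel consumed by A's loop, one unit per popped element (k = number of parents of the level)
def fuelNeeded : Nat → Nat → Nat
  | 0, k => k + 1
  | rem + 1, k => k + 1 + fuelNeeded rem (k + 1)

-- ---------- basic facts ----------

theorem find1Loop_nil (f : Nat) (S : PySem.Set String) (c : Int) :
    find1Loop f [] S c = c := by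
  cases f <;> simp [find1Loop]

theorem toList_nstr (cs : List Char) (j i : Nat) :
    (nstr cs j i).toList = (cs.drop i).take 1 ++ cs.drop j := by
  simp [nstr]

theorem drop_cons_getD (cs : List Char) (i : Nat) (h : i < cs.length) :
    cs.drop i = cs.getD i ' ' :: cs.drop (i + 1) := by
  rw [List.getD_eq_getElem _ _ h]; exact List.drop_eq_getElem_cons h

theorem toList_nstr_lt (cs : List Char) (j i : Nat) (h : i < cs.length) :
    (nstr cs j i).toList = cs.getD i ' ' :: cs.drop j := by
  rw [toList_nstr, drop_cons_getD cs i h]; rfl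

theorem nstr_ne_empty (cs : List Char) (j i : Nat) (h : i < cs.length) :
    nstr cs j i ≠ "" := by
  intro he
  have : (nstr cs j i).toList = ("" : String).toList := by rw [he]
  rw [toList_nstr_lt cs j i h] at this
  simp at this

theorem nstr_empty_of_ge (cs : List Char) (j i : Nat)
    (hi : cs.length ≤ i) (hj : cs.length ≤ j) : nstr cs j i = "" := by
  unfold nstr
  rw [List.drop_eq_nil_of_le hi, List.drop_eq_nil_of_le hj]
  rfl

theorem lt_of_nstr_ne (cs : List Char) (l i : Nat) (h1 : nstr cs l i ≠ "") (h2 : i < l) :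
    i < cs.length := by
  by_contra hge
  push_neg at hge
  exact h1 (nstr_empty_of_ge cs l i hge (by omega))

theorem nstr_stable (cs : List Char) (j1 j2 i : Nat)
    (h1 : cs.length ≤ j1) (h2 : cs.length ≤ j2) : nstr cs j1 i = nstr cs j2 i := by
  unfold nstr
  rw [List.drop_eq_nil_of_le h1, List.drop_eq_nil_of_le h2]

theorem nstr_head_self (cs : List Char) (j : Nat) :
    nstr cs (j + 1) j = String.ofList (cs.drop j) := by
  unfold nstr
  by_cases h : j < cs.length
  · rw [drop_cons_getD cs j h]; rfl
  · push_neg at h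
    rw [List.drop_eq_nil_of_le h, List.drop_eq_nil_of_le (by omega)]
    simp

-- port-A step facts about a non-degenerate parent
theorem slice1_nstr (cs : List Char) (l i : Nat) (h : i < cs.length) :
    PySem.Str.slice (nstr cs l i) (some 1) none = String.ofList (cs.drop l) := by
  simp only [PySem.Str.slice, PySem.Chars.slice_eq_listSlice, toList_nstr_lt cs l i h]
  rw [PySem.List.slice_from_one]
  simp

theorem pyGet0_nstr (cs : List Char) (l i : Nat) (h : i < cs.length) :
    PySem.Str.pyGet? (nstr cs l i) 0 = some (cs.getD i ' ') := by
  simp [PySem.Str.pyGet?, PySem.Chars.pyGet?_eq_listPyGet?, toList_nstr_lt cs l i h,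
    PySem.List.pyGet?_zero_cons]

theorem second_nstr (cs : List Char) (l i : Nat) (h : i < cs.length) :
    pvCons (cs.getD i ' ') (PySem.Str.slice (nstr cs l i) (some 2) none) = nstr cs (l + 1) i := by
  have h2 : PySem.Str.slice (nstr cs l i) (some 2) none = String.ofList (cs.drop (l + 1)) := by
    simp only [PySem.Str.slice, PySem.Chars.slice_eq_listSlice, toList_nstr_lt cs l i h]
    rw [show (2 : Int) = ((2 : Nat) : Int) by norm_num, PySem.List.slice_from_natCast]
    congr 1
    show List.drop 2 (cs.getD i ' ' :: cs.drop l) = _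
    rw [show (2 : Nat) = 1 + 1 from rfl, List.drop_succ_cons, List.drop_drop, Nat.add_comm]
  rw [h2]
  unfold pvCons nstr
  rw [drop_cons_getD cs i h]
  simp

-- set facts
theorem pvContains_mono (S : PySem.Set String) (x t : String)
    (h : PySem.Set.contains S t = true) :
    PySem.Set.contains (PySem.Set.add S x) t = true := by
  rw [PySem.Set.contains_iff] at h ⊢
  exact (PySem.Set.mem_add S x t).mpr (Or.inl h)

theorem pvContains_add_self (S : PySem.Set String) (x : String) :
    PySem.Set.contains (PySem.Set.add S x) x = true := by
  rw [PySem.Set.contains_iff]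
  exact (PySem.Set.mem_add S x x).mpr (Or.inr rfl)

-- ---------- bIter facts ----------

theorem bIter_S_mono (cs : List Char) (j : Nat) (L : List Nat)
    (st : PySem.Set String × Int × List Nat) (t : String)
    (h : PySem.Set.contains st.1 t = true) :
    PySem.Set.contains (bIter cs j L st).1 t = true := by
  induction L generalizing st with
  | nil => exact h
  | cons i L ih =>
      rw [bIter]
      apply ih
      split
      · exact h
      · exact pvContains_mono _ _ _ h

theorem bIter_nxt_mem (cs : List Char) (j : Nat) (L : List Nat)
    (st : PySem.Set String × Int × List Nat) (x : Nat)
    (hx : x ∈ (bIter cs j L st).2.2) : x ∈ st.2.2 ∨ x ∈ L := by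
  induction L generalizing st with
  | nil => exact Or.inl hx
  | cons i L ih =>
      rw [bIter] at hx
      rcases ih _ hx with h | h
      · revert h; split
        · exact fun h => Or.inl h
        · simp only
          split
          · exact fun h => Or.inl h
          · intro h
            rcases List.mem_append.mp h with h | h
            · exact Or.inl h
            · simp only [List.mem_singleton] at h
              exact Or.inr (h ▸ List.mem_cons_self)
      · exact Or.inr (List.mem_cons_of_mem _ h)

theorem bIter_nxt_prop (cs : List Char) (j : Nat) (L : List Nat)
    (st : PySem.Set String × Int × List Nat)
    (h0 : ∀ x ∈ st.2.2, nstr cs j x ≠ "" ∧ PySem.Set.contains st.1 (nstr cs j x) = true) :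
    ∀ x ∈ (bIter cs j L st).2.2,
      nstr cs j x ≠ "" ∧ PySem.Set.contains (bIter cs j L st).1 (nstr cs j x) = true := by
  induction L generalizing st with
  | nil => exact h0
  | cons i L ih =>
      rw [bIter]
      apply ih
      split
      · exact h0
      · rename_i hc
        simp only
        split
        · rename_i he
          intro x hx
          refine ⟨(h0 x hx).1, pvContains_mono _ _ _ (h0 x hx).2⟩
        · rename_i he
          intro x hx
          rcases List.mem_append.mp hx with h | h
          · exact ⟨(h0 x h).1, pvContains_mono _ _ _ (h0 x h).2⟩
          · simp only [List.mem_singleton] at h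
            subst h
            exact ⟨he, pvContains_add_self _ _⟩

theorem bIter_nxt_len (cs : List Char) (j : Nat) (L : List Nat)
    (st : PySem.Set String × Int × List Nat) :
    (bIter cs j L st).2.2.length ≤ st.2.2.length + L.length := by
  induction L generalizing st with
  | nil => simp [bIter]
  | cons i L ih =>
      rw [bIter]
      refine le_trans (ih _) ?_
      split
      · simp
      · simp only
        split
        · simp
        · simp
          omega

theorem bIter_nxt_nil (cs : List Char) (j : Nat) (L : List Nat)
    (st : PySem.Set String × Int × List Nat)
    (h : ∀ i ∈ L, nstr cs j i = "" ∨ PySem.Set.contains st.1 (nstr cs j i) = true) :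
    (bIter cs j L st).2.2 = st.2.2 := by
  induction L generalizing st with
  | nil => rfl
  | cons i L ih =>
      rw [bIter]
      split
      · exact ih _ (fun x hx => h x (List.mem_cons_of_mem _ hx))
      · rename_i hc
        rcases h i List.mem_cons_self with he | hcon
        · rw [he]
          simp only [if_pos rfl]
          apply ih
          intro x hx
          rcases h x (List.mem_cons_of_mem _ hx) with h' | h'
          · exact Or.inl h'
          · exact Or.inr (pvContains_mono _ _ _ h')
        · exact absurd hcon (by simpa using hc)

-- ---------- fuel bookkeeping ----------

theorem fuelNeeded_pos (rem k : Nat) : 1 ≤ fuelNeeded rem k := by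
  cases rem <;> simp [fuelNeeded] <;> omega

theorem fuelNeeded_mono (rem : Nat) : ∀ k k', k ≤ k' → fuelNeeded rem k ≤ fuelNeeded rem k' := by
  induction rem with
  | zero => intro k k' h; simp [fuelNeeded]; omega
  | succ rem ih =>
      intro k k' h
      simp only [fuelNeeded]
      have := ih (k + 1) (k' + 1) (by omega)
      omega

theorem fuelNeeded_le (rem : Nat) : ∀ k, fuelNeeded rem k ≤ (rem + 1) * (k + rem + 2) := by
  induction rem with
  | zero => intro k; simp only [fuelNeeded]; nlinarith
  | succ rem ih =>
      intro k
      simp only [fuelNeeded]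
      have h := ih (k + 1)
      nlinarith

-- ---------- A follows the model ----------

-- popping the remaining parents of a level, once the level head has been tested
theorem popAux (cs : List Char) (l : Nat) (T : List String) :
    ∀ (K : List Nat) (S : PySem.Set String) (c : Int) (M : List Nat) (f : Nat),
      (∀ i ∈ K, i < cs.length) →
      PySem.Set.contains S (String.ofList (cs.drop l)) = true →
      find1Loop (K.length + f) (K.map (nstr cs l) ++ T ++ M.map (nstr cs (l + 1))) S c
        = find1Loop f (T ++ (bIter cs (l + 1) K (S, c, M)).2.2.map (nstr cs (l + 1)))
            (bIter cs (l + 1) K (S, c, M)).1 (bIter cs (l + 1) K (S, c, M)).2.1 := by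
  intro K
  induction K with
  | nil =>
      intro S c M f _ _
      simp [bIter]
  | cons i K ih =>
      intro S c M f hK hhead
      have hi : i < cs.length := hK i List.mem_cons_self
      have hfu : (i :: K).length + f = (K.length + f) + 1 := by simp; omega
      rw [hfu]
      simp only [List.map_cons, List.cons_append]
      rw [find1Loop]
      rw [if_neg (nstr_ne_empty cs l i hi)]
      rw [slice1_nstr cs l i hi, pyGet0_nstr cs l i hi]
      simp only
      rw [second_nstr cs l i hi]
      rw [hhead]
      simp only [if_true]
      rw [bIter]
      by_cases hc : PySem.Set.contains S (nstr cs (l + 1) i) = true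
      · rw [hc]
        simp only [if_true]
        exact ih S c M f (fun x hx => hK x (List.mem_cons_of_mem _ hx)) hhead
      · rw [Bool.eq_false_iff.mpr hc] at *
        simp only [Bool.false_eq_true, if_false, if_neg (nstr_ne_empty cs (l + 1) i hi)]
        have hq : (K.map (nstr cs l) ++ T ++ M.map (nstr cs (l + 1))) ++ [nstr cs (l + 1) i]
            = K.map (nstr cs l) ++ T ++ (M ++ [i]).map (nstr cs (l + 1)) := by
          simp [List.map_append]
        rw [hq]
        exact ih _ _ (M ++ [i]) f (fun x hx => hK x (List.mem_cons_of_mem _ hx))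
          (pvContains_mono _ _ _ hhead)

-- one whole level of A = one bIter over (head :: parents), plus possibly an enqueued ""
theorem levelStep (cs : List Char) (l : Nat) (i1 : Nat) (Kr : List Nat) (T : List String)
    (S : PySem.Set String) (c : Int) (f : Nat)
    (hK : ∀ i ∈ i1 :: Kr, i < cs.length) :
    find1Loop ((i1 :: Kr).length + f) ((i1 :: Kr).map (nstr cs l) ++ T) S c
      = find1Loop f
          (T ++ (if cs.length ≤ l ∧ PySem.Set.contains S "" = false then [""] else [])
             ++ (bIter cs (l + 1) (l :: i1 :: Kr) (S, c, [])).2.2.map (nstr cs (l + 1)))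
          (bIter cs (l + 1) (l :: i1 :: Kr) (S, c, [])).1
          (bIter cs (l + 1) (l :: i1 :: Kr) (S, c, [])).2.1 := by
  have hi : i1 < cs.length := hK i1 List.mem_cons_self
  have hKr : ∀ x ∈ Kr, x < cs.length := fun x hx => hK x (List.mem_cons_of_mem _ hx)
  have hfu : (i1 :: Kr).length + f = (Kr.length + f) + 1 := by simp only [List.length_cons]; omega
  rw [hfu]
  simp only [List.map_cons, List.cons_append]
  rw [find1Loop]
  rw [if_neg (nstr_ne_empty cs l i1 hi)]
  rw [slice1_nstr cs l i1 hi, pyGet0_nstr cs l i1 hi]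
  simp only
  rw [second_nstr cs l i1 hi]
  rw [bIter, nstr_head_self cs l]
  simp only
  by_cases hh : PySem.Set.contains S (String.ofList (cs.drop l)) = true
  · rw [hh]
    simp only [if_true]
    have heQ : (if cs.length ≤ l ∧ PySem.Set.contains S "" = false then [""] else ([] : List String)) = [] := by
      rw [if_neg]
      rintro ⟨h1, h2⟩
      have he : String.ofList (cs.drop l) = "" := by simp [List.drop_eq_nil_of_le h1]
      rw [he, h2] at hh
      cases hh
    rw [heQ]
    rw [bIter]
    simp only
    by_cases hs : PySem.Set.contains S (nstr cs (l + 1) i1) = true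
    · rw [if_pos hs, if_pos hs]
      have h0 := popAux cs l T Kr S c [] f hKr hh
      simp only [List.map_nil, List.append_nil, List.nil_append, List.append_assoc] at h0 ⊢
      exact h0
    · rw [if_neg hs, if_neg hs]
      simp only [if_neg (nstr_ne_empty cs (l + 1) i1 hi)]
      have h0 := popAux cs l T Kr (PySem.Set.add S (nstr cs (l + 1) i1)) (c + 1) [i1] f hKr
        (pvContains_mono _ _ _ hh)
      simp only [List.map_cons, List.map_nil, List.nil_append, List.append_nil,
        List.append_assoc] at h0 ⊢
      exact h0
  · rw [if_neg hh, if_neg hh]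
    simp only
    by_cases hl : cs.length ≤ l
    · have hhe : String.ofList (cs.drop l) = "" := by simp [List.drop_eq_nil_of_le hl]
      rw [hhe] at hh ⊢
      have hcf : PySem.Set.contains S "" = false := Bool.eq_false_iff.mpr hh
      have heQ : (if cs.length ≤ l ∧ PySem.Set.contains S "" = false then [""] else ([] : List String)) = [""] :=
        if_pos ⟨hl, hcf⟩
      rw [heQ, if_pos rfl]
      rw [bIter]
      simp only
      by_cases hs : PySem.Set.contains (PySem.Set.add S "") (nstr cs (l + 1) i1) = true
      · rw [if_pos hs, if_pos hs]
        have h0 := popAux cs l (T ++ [""]) Kr (PySem.Set.add S "") (c + 1) [] f hKr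
          (by rw [hhe]; exact pvContains_add_self _ _)
        simp only [List.map_nil, List.append_nil, List.nil_append, List.append_assoc] at h0 ⊢
        exact h0
      · rw [if_neg hs, if_neg hs]
        simp only [if_neg (nstr_ne_empty cs (l + 1) i1 hi), List.nil_append]
        have h0 := popAux cs l (T ++ [""]) Kr
          (PySem.Set.add (PySem.Set.add S "") (nstr cs (l + 1) i1)) (c + 1 + 1) [i1] f hKr
          (by rw [hhe]; exact pvContains_mono _ _ _ (pvContains_add_self _ _))
        simp only [List.map_cons, List.map_nil, List.nil_append, List.append_nil,
          List.append_assoc] at h0 ⊢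
        exact h0
    · have hlt : l < cs.length := by omega
      have hne : String.ofList (cs.drop l) ≠ "" := by
        rw [← nstr_head_self cs l]
        exact nstr_ne_empty cs (l + 1) l hlt
      have heQ : (if cs.length ≤ l ∧ PySem.Set.contains S "" = false then [""] else ([] : List String)) = [] := by
        rw [if_neg]
        rintro ⟨h1, _⟩
        exact hl h1
      rw [heQ, if_neg hne]
      simp only [List.nil_append]
      rw [bIter]
      simp only
      by_cases hs : PySem.Set.contains (PySem.Set.add S (String.ofList (cs.drop l)))
          (nstr cs (l + 1) i1) = true
      · rw [if_pos hs, if_pos hs]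
        have h0 := popAux cs l T Kr (PySem.Set.add S (String.ofList (cs.drop l))) (c + 1) [l] f hKr
          (pvContains_add_self _ _)
        simp only [List.map_cons, List.map_nil, nstr_head_self, List.nil_append, List.append_nil,
          List.append_assoc] at h0 ⊢
        exact h0
      · rw [if_neg hs, if_neg hs]
        simp only [if_neg (nstr_ne_empty cs (l + 1) i1 hi)]
        have h0 := popAux cs l T Kr
          (PySem.Set.add (PySem.Set.add S (String.ofList (cs.drop l))) (nstr cs (l + 1) i1))
          (c + 1 + 1) [l, i1] f hKr
          (pvContains_mono _ _ _ (pvContains_add_self _ _))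
        simp only [List.map_cons, List.map_nil, nstr_head_self, List.nil_append, List.append_nil,
          List.append_assoc] at h0 ⊢
        exact h0

theorem modelRun_nil (cs : List Char) : ∀ (rem l : Nat) (S : PySem.Set String) (c : Int),
    modelRun cs rem l [] S c = c := by
  intro rem
  induction rem with
  | zero => intro l S c; rfl
  | succ rem ih => intro l S c; simp only [modelRun, if_pos rfl]; exact ih _ _ _

theorem mainA (cs : List Char) : ∀ (rem l : Nat) (K : List Nat) (S : PySem.Set String)
    (c : Int) (eQ : List String) (F : Nat),
    1 ≤ l → l + rem = cs.length + 2 →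
    (∀ i ∈ K, i < l) → (∀ i ∈ K, nstr cs l i ≠ "") →
    (cs.length + 1 ≤ l → ∀ i ∈ K, PySem.Set.contains S (nstr cs l i) = true) →
    (rem = 0 → K = []) →
    (eQ = [] ∨ (eQ = [""] ∧ PySem.Set.contains S "" = true)) →
    fuelNeeded rem K.length ≤ F →
    find1Loop F (eQ ++ K.map (nstr cs l)) S c = modelRun cs rem l K S c := by
  intro rem
  induction rem with
  | zero =>
      intro l K S c eQ F _ _ _ _ _ h6 h7 h8
      rw [h6 rfl]
      rw [h6 rfl] at h8
      simp only [List.map_nil, List.append_nil]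
      rcases h7 with rfl | ⟨rfl, _⟩
      · rw [find1Loop_nil]
        rfl
      · have h1F : 1 ≤ F := le_trans (fuelNeeded_pos 0 _) h8
        obtain ⟨F', rfl⟩ : ∃ F', F = F' + 1 := ⟨F - 1, by omega⟩
        rw [find1Loop, if_pos rfl, find1Loop_nil]
        rfl
  | succ rem ih =>
      intro l K S c eQ F h1 h2 h3 h4 h5 h6 h7 h8
      cases K with
      | nil =>
          rw [modelRun_nil]
          simp only [List.map_nil, List.append_nil]
          rcases h7 with rfl | ⟨rfl, _⟩
          · exact find1Loop_nil _ _ _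
          · have h1F : 1 ≤ F := le_trans (fuelNeeded_pos (rem + 1) _) h8
            obtain ⟨F', rfl⟩ : ∃ F', F = F' + 1 := ⟨F - 1, by omega⟩
            rw [find1Loop, if_pos rfl, find1Loop_nil]
      | cons i1 Kr =>
          have hne : (i1 :: Kr) ≠ ([] : List Nat) := by simp
          have hKlt : ∀ i ∈ i1 :: Kr, i < cs.length := fun i hi =>
            lt_of_nstr_ne cs l i (h4 i hi) (h3 i hi)
          have key : ∀ f0, fuelNeeded rem (Kr.length + 1 + 1) ≤ f0 →
              find1Loop ((i1 :: Kr).length + f0) ((i1 :: Kr).map (nstr cs l)) S c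
                = modelRun cs (rem + 1) l (i1 :: Kr) S c := by
            intro f0 hf0
            rw [← List.append_nil ((i1 :: Kr).map (nstr cs l))]
            rw [levelStep cs l i1 Kr [] S c f0 hKlt]
            simp only [List.nil_append]
            simp only [modelRun, if_neg hne]
            -- invariants for the next level
            have hmem : ∀ i ∈ (bIter cs (l + 1) (l :: i1 :: Kr) (S, c, [])).2.2, i < l + 1 := by
              intro i hi
              rcases bIter_nxt_mem cs (l + 1) _ _ i hi with h | h
              · cases h
              · rcases List.mem_cons.mp h with rfl | h
                · omega
                · have := h3 i h; omega
            have hprop := bIter_nxt_prop cs (l + 1) (l :: i1 :: Kr) (S, c, [])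
              (by intro x hx; cases hx)
            have hnil0 : rem = 0 → (bIter cs (l + 1) (l :: i1 :: Kr) (S, c, [])).2.2 = [] := by
              intro hrem0
              have hll : l = cs.length + 1 := by omega
              apply bIter_nxt_nil
              intro i hi
              rcases List.mem_cons.mp hi with heq | hi'
              · rw [heq]
                exact Or.inl (nstr_empty_of_ge cs (l + 1) l (by omega) (by omega))
              · refine Or.inr ?_
                rw [nstr_stable cs (l + 1) l i (by omega) (by omega)]
                exact h5 (by omega) i hi'
            have hlen : (bIter cs (l + 1) (l :: i1 :: Kr) (S, c, [])).2.2.length ≤ Kr.length + 1 + 1 := by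
              have := bIter_nxt_len cs (l + 1) (l :: i1 :: Kr) (S, c, [])
              simp only [List.length_nil, List.length_cons] at this
              omega
            have hfuel : fuelNeeded rem (bIter cs (l + 1) (l :: i1 :: Kr) (S, c, [])).2.2.length ≤ f0 :=
              le_trans (fuelNeeded_mono rem _ _ hlen) hf0
            by_cases hce : cs.length ≤ l ∧ PySem.Set.contains S "" = false
            · rw [if_pos hce]
              have hr1 : PySem.Set.contains (bIter cs (l + 1) (l :: i1 :: Kr) (S, c, [])).1 "" = true := by
                rw [bIter]
                have hhe : nstr cs (l + 1) l = "" := nstr_empty_of_ge cs (l + 1) l hce.1 (by omega)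
                rw [hhe, hce.2]
                simp only [Bool.false_eq_true, if_false]
                exact bIter_S_mono cs (l + 1) _ _ _ (pvContains_add_self S "")
              exact ih (l + 1) _ _ _ [""] f0 (by omega) (by omega) hmem
                (fun i hi => (hprop i hi).1) (fun _ i hi => (hprop i hi).2) hnil0
                (Or.inr ⟨rfl, hr1⟩) hfuel
            · rw [if_neg hce]
              simp only [List.nil_append]
              exact ih (l + 1) _ _ _ [] f0 (by omega) (by omega) hmem
                (fun i hi => (hprop i hi).1) (fun _ i hi => (hprop i hi).2) hnil0
                (Or.inl rfl) hfuel
          rcases h7 with rfl | ⟨rfl, _⟩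
          · simp only [List.nil_append]
            simp only [fuelNeeded, List.length_cons] at h8
            obtain ⟨f0, rfl⟩ : ∃ f0, F = (i1 :: Kr).length + f0 :=
              ⟨F - (Kr.length + 1), by simp only [List.length_cons]; omega⟩
            exact key f0 (by simp only [List.length_cons] at h8 ⊢; omega)
          · simp only [fuelNeeded, List.length_cons] at h8
            obtain ⟨F', rfl⟩ : ∃ F', F = ((i1 :: Kr).length + F') + 1 :=
              ⟨F - (Kr.length + 2), by simp only [List.length_cons]; omega⟩
            simp only [List.singleton_append]
            rw [find1Loop, if_pos rfl]
            exact key F' (by simp only [List.length_cons] at h8; omega)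

theorem pvCat_nstr (str_ : String) (l i : Nat) :
    pvCat (PySem.Str.slice str_ (some ((i : Nat) : Int)) (some (((i : Nat) : Int) + 1)))
        (PySem.Str.slice str_ (some ((l : Nat) : Int)) none) = nstr str_.toList l i := by
  unfold pvCat nstr
  congr 1
  rw [show ((i : Nat) : Int) + 1 = (((i + 1 : Nat)) : Int) by push_cast; ring]
  simp only [PySem.Str.slice, PySem.Chars.slice_eq_listSlice, String.toList_ofList,
    PySem.List.slice_natCast, PySem.List.slice_from_natCast, Nat.add_sub_cancel_left]

theorem innerBridge (str_ : String) (l : Nat) :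
    ∀ (L : List Nat) (S : PySem.Set String) (c : Int) (M : List Nat),
      List.foldl (find1AltInner str_ (PySem.Str.slice str_ (some ((l : Nat) : Int)) none))
          (S, c, M.map (Nat.cast : Nat → Int)) (L.map (Nat.cast : Nat → Int))
        = ((bIter str_.toList l L (S, c, M)).1, (bIter str_.toList l L (S, c, M)).2.1,
           (bIter str_.toList l L (S, c, M)).2.2.map (Nat.cast : Nat → Int)) := by
  intro L
  induction L with
  | nil => intro S c M; rfl
  | cons i L ih =>
      intro S c M
      simp only [List.map_cons, List.foldl_cons]
      rw [bIter]
      simp only [find1AltInner, pvCat_nstr str_ l i]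
      by_cases hb : PySem.Set.contains S (nstr str_.toList l i) = true
      · rw [if_pos hb, if_pos hb]
        exact ih S c M
      · rw [if_neg hb, if_neg hb]
        by_cases he : nstr str_.toList l i = ""
        · rw [if_pos he, if_pos he]
          exact ih _ _ M
        · rw [if_neg he, if_neg he]
          have hm : M.map (Nat.cast : Nat → Int) ++ [((i : Nat) : Int)]
              = (M ++ [i]).map (Nat.cast : Nat → Int) := by
            simp
          rw [hm]
          exact ih _ _ (M ++ [i])

theorem runBridge (str_ : String) : ∀ (rem l : Nat) (K : List Nat) (S : PySem.Set String)
    (c : Int), l + rem = str_.toList.length + 2 →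
    ((PySem.List.pyRange ((l : Int) + 1) ((str_.toList.length : Int) + 3) 1).foldl
        (find1AltStep str_)
        (S, c, (if K = [] then [] else l :: K).map (Nat.cast : Nat → Int))).2.1
      = modelRun str_.toList rem l K S c := by
  intro rem
  induction rem with
  | zero =>
      intro l K S c h
      rw [PySem.List.pyRange_one_eq_nil (by push_cast; omega)]
      rfl
  | succ rem ih =>
      intro l K S c h
      rw [PySem.List.pyRange_one_cons (by push_cast; omega)]
      simp only [List.foldl_cons]
      rw [show ((l : Int) + 1) = (((l + 1 : Nat)) : Int) by push_cast; ring]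
      simp only [find1AltStep]
      have hM0 : (S, c, ([] : List Nat).map (Nat.cast : Nat → Int)) = (S, c, ([] : List Int)) := rfl
      rw [← hM0, innerBridge str_ (l + 1) (if K = [] then [] else l :: K) S c []]
      simp only [modelRun]
      have hm2 : (if List.map (Nat.cast : Nat → Int)
              (bIter str_.toList (l + 1) (if K = [] then [] else l :: K) (S, c, [])).2.2 = []
            then ([] : List Int)
            else ((l + 1 : Nat) : Int) :: List.map (Nat.cast : Nat → Int)
              (bIter str_.toList (l + 1) (if K = [] then [] else l :: K) (S, c, [])).2.2)
          = List.map (Nat.cast : Nat → Int)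
              (if (bIter str_.toList (l + 1) (if K = [] then [] else l :: K) (S, c, [])).2.2 = []
               then ([] : List Nat)
               else (l + 1) :: (bIter str_.toList (l + 1) (if K = [] then [] else l :: K) (S, c, [])).2.2) := by
        cases (bIter str_.toList (l + 1) (if K = [] then [] else l :: K) (S, c, [])).2.2 <;> simp
      rw [hm2]
      exact ih (l + 1) _ _ _ (by omega)

theorem find1_eq_alt (str_ : String) (set_ : List String) :
    find1 str_ set_ = find1_alt str_ set_ := by
  by_cases hz : str_ = ""
  · subst hz
    rfl
  · have hcs : str_.toList ≠ [] := by
      intro h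
      apply hz
      have := congrArg String.ofList h
      simpa using this
    have hn : 1 ≤ str_.toList.length := by
      cases h : str_.toList with
      | nil => exact absurd h hcs
      | cons a t => simp
    have h0 : nstr str_.toList 1 0 = str_ := by
      unfold nstr
      rw [List.drop_zero, List.take_append_drop]
      simp

    -- A side
    have hA : find1 str_ set_ = modelRun str_.toList (str_.toList.length + 1) 1 [0] set_ 0 := by
      unfold find1
      have hq : [str_] = ([] : List String) ++ [0].map (nstr str_.toList 1) := by
        simp [h0]
      rw [hq]
      apply mainA str_.toList (str_.toList.length + 1) 1 [0] set_ 0 []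
      · omega
      · omega
      · intro i hi
        simp only [List.mem_singleton] at hi
        omega
      · intro i hi
        simp only [List.mem_singleton] at hi
        rw [hi, h0]
        exact hz
      · intro habs
        omega
      · intro habs
        omega
      · exact Or.inl rfl
      · simp only [List.length_singleton, PySem.Str.len_eq, Int.toNat_natCast]
        refine le_trans (fuelNeeded_le (str_.toList.length + 1) 1) ?_
        nlinarith [str_.toList.length.zero_le]
    -- B side
    have hB : find1_alt str_ set_ = modelRun str_.toList (str_.toList.length + 1) 1 [0] set_ 0 := by
      unfold find1_alt
      rw [if_neg hz]
      simp only [PySem.Str.len_eq]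
      have := runBridge str_ (str_.toList.length + 1) 1 [0] set_ 0 (by omega)
      rw [show ((1 : Nat) : Int) + 1 = (2 : Int) by norm_num] at this
      simp only [show (if ([0] : List Nat) = [] then [] else 1 :: [0]) = [1, 0] from rfl,
        List.map_cons, List.map_nil, Nat.cast_one, Nat.cast_zero] at this
      exact this
    rw [hA, hB]

-- ===== VERDICT (by name: the statement is the Claim_ definition above) =====
theorem find1_spec : Claim_equal_find1 := by
  intro str_ set_ _
  unfold Spec_find1
  exact find1_eq_alt str_ set_
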